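-- pv_equiv track=rewrite | github.com/brentyi/tyro | tyro/_instantiators.py | _join_union_metavars
-- ===== SOURCE A (Python) =====
-- from typing import (
--     Any,
--     Callable,
--     Dict,
--     FrozenSet,
--     Hashable,
--     Iterable,
--     List,
--     Optional,
--     Sequence,
--     Set,
--     Tuple,
--     TypeVar,
--     Union,
--     cast,
--     overload,
-- )
--
-- def _join_union_metavars(metavars: Iterable[str]) -> str:
--     """Metavar generation helper for unions. Could be revisited.
--
--     Examples:
--         None, INT => NONE|INT
--         {0,1,2}, {3,4} => {0,1,2,3,4}
--         {0,1,2}, {3,4}, STR => {0,1,2,3,4}|STR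
--         {None}, INT [INT ...] => {None}|{INT [INT ...]}
--         STR, INT [INT ...] => STR|{INT [INT ...]}
--         STR, INT INT => STR|{INT INT}
--
--     The curly brackets are unfortunately overloaded but alternatives all interfere with
--     argparse internals.
--     """
--     metavars = tuple(metavars)
--     merged_metavars = [metavars[0]]
--     for i in range(1, len(metavars)):
--         prev = merged_metavars[-1]
--         curr = metavars[i]
--         if (
--             prev.startswith("{")
--             and prev.endswith("}")
--             and curr.startswith("{")
--             and curr.endswith("}")
--         ):
--             merged_metavars[-1] = prev[:-1] + "," + curr[1:]
--         else:
--             merged_metavars.append(curr)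
--
--     for i, m in enumerate(merged_metavars):
--         if " " in m:
--             merged_metavars[i] = "{" + m + "}"
--
--     return "|".join(merged_metavars)
-- ===== SOURCE B (Python) =====
-- def _join_union_metavars(metavars):
--     """Run-based rewrite: collect maximal runs of brace-wrapped metavars and
--     collapse each run into one brace token, then wrap space-containing tokens."""
--     merged = []
--     run = []  # inner texts of the current run of brace-wrapped metavars
--     for s in metavars:
--         if s.startswith("{") and s.endswith("}"):
--             run.append(s[1:-1])
--         else:
--             if run:
--                 merged.append("{" + ",".join(run) + "}")
--                 run = []
--             merged.append(s)
--     if run: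
--         merged.append("{" + ",".join(run) + "}")
--     return "|".join("{" + m + "}" if " " in m else m for m in merged)
-- ===== Notes on version B (the rewrite author's own statement) =====
-- stated objective: alternative
-- what changed: Replaces A's merge-into-last-list-element loop (mutating merged[-1]) plus a second in-place rewrite pass by a single fold that accumulates the inner texts of each maximal run of brace-wrapped metavars and flushes the whole run as one token.
import Mathlib
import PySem

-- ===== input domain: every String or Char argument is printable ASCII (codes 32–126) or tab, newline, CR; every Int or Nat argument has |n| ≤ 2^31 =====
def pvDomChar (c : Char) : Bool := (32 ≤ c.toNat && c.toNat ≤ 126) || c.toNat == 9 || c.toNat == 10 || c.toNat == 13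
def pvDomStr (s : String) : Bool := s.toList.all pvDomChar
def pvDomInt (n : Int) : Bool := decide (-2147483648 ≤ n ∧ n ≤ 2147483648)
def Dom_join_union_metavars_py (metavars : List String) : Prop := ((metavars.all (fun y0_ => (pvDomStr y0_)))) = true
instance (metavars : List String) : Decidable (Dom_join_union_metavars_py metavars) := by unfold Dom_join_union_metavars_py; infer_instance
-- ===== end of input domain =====

-- B replaces A's merge-into-last-element loop plus in-place rewrite pass by a run-accumulator
-- fold that collapses each maximal run of brace-wrapped metavars at once (objective: alternative
-- decomposition; equivalence proved on nonempty input, where A does not raise).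

-- ===== PORT A =====
-- one step of A's `for i in range(1, len(metavars))` loop; merged[-1] read as getLastD
-- (merged is never empty in Python, so the default is never the value used)
def pvStepA (merged : List String) (curr : String) : List String :=
  let prev := merged.getLastD ""
  if PySem.Str.startswith prev "{" && PySem.Str.endswith prev "}"
      && PySem.Str.startswith curr "{" && PySem.Str.endswith curr "}" then
    merged.dropLast ++ [PySem.Str.slice prev none (some (-1)) ++ "," ++ PySem.Str.slice curr (some 1) none]
  else
    merged ++ [curr]

def join_union_metavars_py (metavars : List String) : String :=
  match metavars with
  | [] => ""   -- Python raises IndexError at metavars[0]; excluded by Pre_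
  | m0 :: rest =>
    let merged := rest.foldl pvStepA [m0]
    let merged := merged.map (fun m => if PySem.Str.isIn " " m then "{" ++ m ++ "}" else m)
    PySem.Str.join "|" merged

-- ===== PORT B =====
def pvBraced (s : String) : Bool :=
  PySem.Str.startswith s "{" && PySem.Str.endswith s "}"

-- `if run: merged.append("{" + ",".join(run) + "}")`
def pvFlush (merged : List String) (run : List String) : List String :=
  if run = [] then merged else merged ++ ["{" ++ PySem.Str.join "," run ++ "}"]

-- one step of B's loop over the metavars, state = (merged, run)
def pvStepB (acc : List String × List String) (s : String) : List String × List String :=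
  if pvBraced s then
    (acc.1, acc.2 ++ [PySem.Str.slice s (some 1) (some (-1))])
  else
    (pvFlush acc.1 acc.2 ++ [s], [])

def join_union_metavars_py_alt (metavars : List String) : String :=
  let acc := metavars.foldl pvStepB ([], [])
  let merged := pvFlush acc.1 acc.2
  PySem.Str.join "|" (merged.map (fun m => if PySem.Str.isIn " " m then "{" ++ m ++ "}" else m))

-- ===== PRECONDITION & SPEC =====
-- Pre_ excludes only the empty list, on which Python A raises IndexError (metavars[0]).
def Pre_join_union_metavars_py (metavars : List String) : Prop := metavars ≠ []
instance (metavars : List String) : Decidable (Pre_join_union_metavars_py metavars) := by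
  unfold Pre_join_union_metavars_py; infer_instance

def pvWitness_join_union_metavars_py : List String := ["{0,1}", "{None}", "INT [INT ...]"]

def Spec_join_union_metavars_py (metavars : List String) (out : String) : Prop :=
  out = join_union_metavars_py_alt metavars
instance (metavars : List String) (out : String) : Decidable (Spec_join_union_metavars_py metavars out) := by
  unfold Spec_join_union_metavars_py; infer_instance

-- ===== CLAIM (what is proved, stated in full; the proofs are below) =====
def Claim_equal_join_union_metavars_py : Prop := ∀ (metavars : List String), Dom_join_union_metavars_py metavars → Pre_join_union_metavars_py metavars → Spec_join_union_metavars_py metavars (join_union_metavars_py metavars)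

-- ===== LEMMAS AND PROOFS =====

-- `",".join(xs ++ [y])` for nonempty xs, on the List Char side
lemma intercalate_append_singleton (sep y : List Char) :
    ∀ (xs : List (List Char)), xs ≠ [] →
      sep.intercalate (xs ++ [y]) = sep.intercalate xs ++ sep ++ y
  | [], h => absurd rfl h
  | [a], _ => by simp [List.intercalate, List.intersperse]
  | a :: b :: xs, _ => by
    have ih := intercalate_append_singleton sep y (b :: xs) (by simp)
    have key : ∀ (c d : List Char) (l : List (List Char)),
        sep.intercalate (c :: d :: l) = c ++ sep ++ sep.intercalate (d :: l) := by
      intro c d l; simp [List.intercalate, List.intersperse]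
    calc sep.intercalate ((a :: b :: xs) ++ [y])
        = a ++ sep ++ sep.intercalate ((b :: xs) ++ [y]) := key a b (xs ++ [y])
      _ = a ++ sep ++ (sep.intercalate (b :: xs) ++ sep ++ y) := by rw [ih]
      _ = sep.intercalate (a :: b :: xs) ++ sep ++ y := by rw [key a b xs]; simp

-- s[1:-1] on the List Char side
lemma slice_one_neg_one (l : List Char) :
    PySem.List.slice l (some 1) (some (-1)) = (l.drop 1).dropLast := by
  simp [PySem.List.slice]
  cases l with
  | nil => simp
  | cons a t => simp [List.dropLast_eq_take]

lemma wrap_decomp (l : List Char) (h1 : ['{'] <+: l) (h2 : ['}'] <:+ l) :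
    l = '{' :: (l.drop 1).dropLast ++ ['}'] := by
  obtain ⟨t, ht⟩ := h1
  obtain ⟨u, hu⟩ := h2
  cases u with
  | nil => rw [← hu] at ht; simp at ht
  | cons c u' =>
    rw [← hu] at ht ⊢
    simp only [List.cons_append] at ht
    obtain ⟨hc, -⟩ := List.cons_eq_cons.mp ht
    subst hc
    simp

-- a brace-wrapped string is rebuilt from its inner text s[1:-1]
lemma braced_recomp (s : String) (h : pvBraced s = true) :
    "{" ++ PySem.Str.slice s (some 1) (some (-1)) ++ "}" = s := by
  simp only [pvBraced, Bool.and_eq_true, PySem.Str.startswith_eq, PySem.Str.endswith_eq] at h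
  obtain ⟨h1, h2⟩ := h
  rw [PySem.Chars.startswith_iff] at h1
  rw [PySem.Chars.endswith_iff] at h2
  have hbr : "{".toList = ['{'] := by decide
  have hbl : "}".toList = ['}'] := by decide
  rw [hbr] at h1; rw [hbl] at h2
  apply String.toList_inj.mp
  simp only [String.toList_append, hbr, hbl, PySem.Str.toList_slice,
    PySem.Chars.slice_eq_listSlice, slice_one_neg_one]
  simpa using (wrap_decomp s.toList h1 h2).symm

lemma toList_drop_one_of_braced (s : String) (h : pvBraced s = true) :
    s.toList.drop 1 = (PySem.Str.slice s (some 1) (some (-1))).toList ++ ['}'] := by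
  conv_lhs => rw [← braced_recomp s h]
  simp only [String.toList_append, PySem.Str.toList_slice, PySem.Chars.slice_eq_listSlice]
  have hbr : "{".toList = ['{'] := by decide
  have hbl : "}".toList = ['}'] := by decide
  simp [hbr, hbl]

-- the token "{" ++ ",".join(run) ++ "}" is itself brace-wrapped
lemma braced_flush_token (run : List String) :
    pvBraced ("{" ++ PySem.Str.join "," run ++ "}") = true := by
  simp only [pvBraced, Bool.and_eq_true, PySem.Str.startswith_eq, PySem.Str.endswith_eq]
  have hbr : "{".toList = ['{'] := by decide
  have hbl : "}".toList = ['}'] := by decide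
  constructor
  · rw [PySem.Chars.startswith_iff]; simp [hbr, hbl]
  · rw [PySem.Chars.endswith_iff]
    exact ⟨'{' :: PySem.Chars.join [','] (List.map String.toList run), by simp [hbl]⟩

-- A's in-place merge of a brace-wrapped curr into the flushed run token equals B's extended run token
lemma merge_token (run : List String) (curr : String) (hc : pvBraced curr = true) (hr : run ≠ []) :
    PySem.Str.slice ("{" ++ PySem.Str.join "," run ++ "}") none (some (-1)) ++ "," ++ PySem.Str.slice curr (some 1) none
    = "{" ++ PySem.Str.join "," (run ++ [PySem.Str.slice curr (some 1) (some (-1))]) ++ "}" := by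
  apply String.toList_inj.mp
  have hbr : "{".toList = ['{'] := by decide
  have hbl : "}".toList = ['}'] := by decide
  have hcm : ",".toList = [','] := by decide
  have hslice_to : ∀ (t : String), (PySem.Str.slice t none (some (-1))).toList = t.toList.dropLast := by
    intro t; simp [pysem]
  have hslice_from : ∀ (t : String), (PySem.Str.slice t (some 1) none).toList = t.toList.drop 1 := by
    intro t; simp [pysem]
  simp only [String.toList_append, hslice_to, hslice_from, hbr, hbl, hcm,
    toList_drop_one_of_braced curr hc]
  have hj : ∀ (l : List String), (PySem.Str.join "," l).toList = (",".toList).intercalate (l.map String.toList) := by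
    intro l; simp [PySem.Chars.join]
  rw [hj, hj, List.map_append, List.map_singleton,
    intercalate_append_singleton _ _ _ (by simpa using hr), hcm]
  rw [List.dropLast_concat]
  simp

-- a singleton run flushes back to the original brace-wrapped string
lemma single_token (s : String) (hb : pvBraced s = true) :
    "{" ++ PySem.Str.join "," [PySem.Str.slice s (some 1) (some (-1))] ++ "}" = s := by
  have hjoin : PySem.Str.join "," [PySem.Str.slice s (some 1) (some (-1))]
      = PySem.Str.slice s (some 1) (some (-1)) := by
    apply String.toList_inj.mp
    simp [PySem.Chars.join, List.intercalate]
  rw [hjoin, braced_recomp s hb]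

-- `merged` never ends in a brace-wrapped string when the current run is empty
def pvLastOk (merged : List String) : Prop :=
  ∀ x, merged.getLast? = some x → pvBraced x = false

lemma last_not_braced (mergedB : List String) (hlast : pvLastOk mergedB) :
    pvBraced (mergedB.getLastD "") = false := by
  cases hm : mergedB.getLast? with
  | none =>
    have h0 : mergedB = [] := List.getLast?_eq_none_iff.mp hm
    subst h0; decide
  | some x =>
    have hx := hlast x hm
    rw [List.getLastD_eq_getLast?, hm]
    exact hx

-- A's four-way condition is the conjunction of the two bracedness tests
lemma condA_eq (p c : String) :
    (PySem.Str.startswith p "{" && PySem.Str.endswith p "}"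
      && PySem.Str.startswith c "{" && PySem.Str.endswith c "}") = (pvBraced p && pvBraced c) := by
  simp [pvBraced, Bool.and_assoc]

lemma stepA_eq (merged : List String) (curr : String) :
    pvStepA merged curr =
      if pvBraced (merged.getLastD "") && pvBraced curr then
        merged.dropLast ++ [PySem.Str.slice (merged.getLastD "") none (some (-1)) ++ "," ++ PySem.Str.slice curr (some 1) none]
      else merged ++ [curr] := by
  simp only [pvStepA, condA_eq]

lemma stepA_nil (m0 : String) : pvStepA [] m0 = [m0] := by
  rw [stepA_eq]
  simp [show pvBraced "" = false from by decide]

-- single-step correspondence between A's and B's loop bodies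
lemma step_correspond (mergedB run : List String) (hlast : run = [] → pvLastOk mergedB) (curr : String) :
    pvStepA (pvFlush mergedB run) curr
      = pvFlush (pvStepB (mergedB, run) curr).1 (pvStepB (mergedB, run) curr).2 ∧
    ((pvStepB (mergedB, run) curr).2 = [] → pvLastOk (pvStepB (mergedB, run) curr).1) := by
  by_cases hc : pvBraced curr = true
  · -- B extends the run
    simp only [pvStepB, hc, if_pos]
    refine ⟨?_, by intro h; simp at h⟩
    cases run with
    | nil =>
      -- A appends curr; the flushed singleton run reconstitutes curr
      have hnb : pvBraced (mergedB.getLastD "") = false := last_not_braced _ (hlast rfl)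
      rw [show pvFlush mergedB [] = mergedB from by simp [pvFlush]]
      rw [show pvFlush mergedB ([] ++ [PySem.Str.slice curr (some 1) (some (-1))])
            = mergedB ++ ["{" ++ PySem.Str.join "," [PySem.Str.slice curr (some 1) (some (-1))] ++ "}"] from by
          simp [pvFlush]]
      rw [stepA_eq, hnb]
      simp only [Bool.false_and, Bool.false_eq_true, if_false]
      rw [single_token curr hc]
    | cons r rs =>
      -- A merges into merged[-1], which is the flushed token of the run so far
      have hF := braced_flush_token (r :: rs)
      simp only [pvFlush, if_neg (by simp : ¬(r :: rs = [])),
        if_neg (by simp : ¬(r :: rs ++ [PySem.Str.slice curr (some 1) (some (-1))] = []))]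
      rw [stepA_eq]
      simp only [List.getLastD_eq_getLast?, List.getLast?_concat, Option.getD_some, hF, hc,
        Bool.and_self, if_true, List.dropLast_concat]
      rw [merge_token (r :: rs) curr hc (by simp)]
  · -- curr is not brace-wrapped: B flushes and appends; A appends (its merge test fails)
    have hc' : pvBraced curr = false := by simpa using hc
    simp only [pvStepB, hc', Bool.false_eq_true, if_false]
    constructor
    · rw [stepA_eq, hc']
      simp [pvFlush]
    · intro _ x hx
      simp only [List.getLast?_concat, Option.some.injEq] at hx
      subst hx
      exact hc'

-- the loop invariant, pushed through the rest of the list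
lemma fold_correspond (l : List String) : ∀ (mergedB run : List String),
    (run = [] → pvLastOk mergedB) →
    l.foldl pvStepA (pvFlush mergedB run)
      = pvFlush (l.foldl pvStepB (mergedB, run)).1 (l.foldl pvStepB (mergedB, run)).2 := by
  induction l with
  | nil => intro mergedB run _; simp
  | cons curr l ih =>
    intro mergedB run hlast
    obtain ⟨h1, h2⟩ := step_correspond mergedB run hlast curr
    simp only [List.foldl_cons, h1]
    have := ih (pvStepB (mergedB, run) curr).1 (pvStepB (mergedB, run) curr).2 h2
    simpa using this

-- ===== VERDICT (by name: the statement is the Claim_ definition above) =====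
theorem join_union_metavars_py_spec : Claim_equal_join_union_metavars_py := by
  intro metavars _ hpre
  unfold Spec_join_union_metavars_py
  match metavars with
  | [] => exact absurd rfl hpre
  | m0 :: rest =>
    simp only [join_union_metavars_py, join_union_metavars_py_alt, List.foldl_cons]
    have hmain := fold_correspond (m0 :: rest) [] [] (fun _ x hx => by simp at hx)
    rw [show pvFlush [] [] = ([] : List String) from by simp [pvFlush]] at hmain
    simp only [List.foldl_cons, stepA_nil] at hmain
    rw [hmain]
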